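-- pv_equiv track=rewrite | github.com/erinepshovel-code/a0 | a0python/a0/cores/ptca/seed_router.py | _trace_heptagram
-- ===== SOURCE A (Python) =====
-- from typing import Any, Dict, List, Optional, Set
--
-- def _trace_heptagram(mr: int, start_local: int) -> List[int]:
--     """Trace the {7/3} path through all 7 seeds of a meta router."""
--     path = []
--     current = start_local
--     visited: Set[int] = set()
--     for _ in range(7):
--         if current in visited:
--             break
--         path.append(current)
--         visited.add(current)
--         current = (current + 3) % 7
--     return path
-- ===== SOURCE B (Python) =====
-- from typing import List
--
-- def _trace_heptagram(mr: int, start_local: int) -> List[int]: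
--     # 3 and 7 are coprime, so the 7-step walk never revisits a seed:
--     # each position is a closed-form function of the step index.
--     return [start_local] + [(start_local + 3 * k) % 7 for k in range(1, 7)]
-- ===== Notes on version B (the rewrite author's own statement) =====
-- stated objective: simpler
-- what changed: Replaces the iterative walk with its visited-set and break (which can never trigger, since gcd(3,7)=1) by a closed-form index formula producing each of the 7 positions directly.
import Mathlib
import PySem

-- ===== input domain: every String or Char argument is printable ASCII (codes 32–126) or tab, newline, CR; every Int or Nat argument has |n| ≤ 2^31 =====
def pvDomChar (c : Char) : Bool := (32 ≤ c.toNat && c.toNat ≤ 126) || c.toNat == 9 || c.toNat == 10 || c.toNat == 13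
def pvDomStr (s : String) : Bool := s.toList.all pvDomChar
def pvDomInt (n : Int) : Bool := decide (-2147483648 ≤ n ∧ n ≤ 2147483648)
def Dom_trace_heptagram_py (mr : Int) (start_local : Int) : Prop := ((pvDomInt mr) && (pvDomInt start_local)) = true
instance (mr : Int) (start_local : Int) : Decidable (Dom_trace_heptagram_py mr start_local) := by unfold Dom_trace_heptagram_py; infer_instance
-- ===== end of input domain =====

-- B replaces A's iterative walk with visited-set cycle detection (dead, since gcd(3,7)=1)
-- by a closed-form index formula for each of the 7 positions; objective: simpler.


-- ===== PORT A =====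
-- the for-loop over range(7) with 'break' as fuel recursion over (path, current, visited)
def traceLoopA : Nat → List Int → Int → PySem.Set Int → List Int
  | 0, path, _, _ => path
  | n+1, path, current, visited =>
    if PySem.Set.contains visited current then path
    else traceLoopA n (path ++ [current]) (PySem.Int.mod (current + 3) 7) (PySem.Set.add visited current)

def trace_heptagram_py (mr : Int) (start_local : Int) : List Int :=
  traceLoopA 7 [] start_local PySem.Set.empty

-- ===== PORT B =====
def trace_heptagram_py_alt (mr : Int) (start_local : Int) : List Int :=
  [start_local] ++ (PySem.List.pyRange 1 7 1).map (fun k => PySem.Int.mod (start_local + 3 * k) 7)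

-- ===== PRECONDITION & SPEC =====
def Spec_trace_heptagram_py (mr : Int) (start_local : Int) (out : List Int) : Prop := out = trace_heptagram_py_alt mr start_local
instance (mr : Int) (start_local : Int) (out : List Int) : Decidable (Spec_trace_heptagram_py mr start_local out) := by unfold Spec_trace_heptagram_py; infer_instance

-- ===== CLAIM (what is proved, stated in full; the proofs are below) =====
def Claim_equal_trace_heptagram_py : Prop := ∀ (mr : Int) (start_local : Int), Dom_trace_heptagram_py mr start_local → Spec_trace_heptagram_py mr start_local (trace_heptagram_py mr start_local)

-- ===== LEMMAS AND PROOFS =====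

-- ===== VERDICT (by name: the statement is the Claim_ definition above) =====
theorem trace_heptagram_py_spec : Claim_equal_trace_heptagram_py := by
  intro mr s _
  show trace_heptagram_py mr s = trace_heptagram_py_alt mr s
  have hmod : ∀ a : Int, PySem.Int.mod a 7 = a % 7 :=
    fun a => PySem.Int.mod_eq_emod_of_pos (by norm_num)
  simp only [trace_heptagram_py, trace_heptagram_py_alt, traceLoopA, PySem.Set.empty,
    PySem.Set.add, PySem.Set.contains, hmod, PySem.List.pyRange, List.nil_append,
    List.contains_nil, Bool.false_eq_true, if_false, List.append_assoc,
    List.singleton_append, List.contains_cons, Bool.or_false, beq_iff_eq]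
  split_ifs <;> simp_all <;>
    first
      | omega
      | (simp only [show (List.range 6) = [0,1,2,3,4,5] from rfl, List.map_cons, List.map_nil,
          Function.comp, List.cons.injEq, and_true]
         push_cast
         omega)
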